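-- pv_equiv track=rewrite | github.com/awktavian/art | orb/packages/kagami/core/motivation/physical_policy_space.py | _validate_rooms
-- ===== SOURCE A (Python) =====
-- VALID_ROOMS = frozenset(
--     {
--         "Living Room",
--         "Kitchen",
--         "Dining",
--         "Entry",
--         "Mudroom",
--         "Garage",
--         "Deck",
--         "Porch",
--         "Powder Room",
--         "Stairway",
--         "Primary Bedroom",
--         "Primary Bath",
--         "Primary Closet",
--         "Primary Hall",
--         "Office",
--         "Office Bath",
--         "Bed 3",
--         "Bath 3",
--         "Loft",
--         "Laundry",
--         "Game Room",
--         "Bed 4",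
--         "Bath 4",
--         "Gym",
--         "Rack Room",
--         "Patio",
--     }
-- )
--
-- def _validate_rooms(rooms: list[str]) -> tuple[list[str], list[str]]:
--     """Validate room names against known rooms.
--
--     Returns:
--         Tuple of (valid_rooms, invalid_rooms)
--     """
--     valid = []
--     invalid = []
--     for room in rooms:
--         if room in VALID_ROOMS:
--             valid.append(room)
--         else:
--             # Try fuzzy matching
--             room_lower = room.lower()
--             matched = False
--             for valid_room in VALID_ROOMS:
--                 if valid_room.lower() == room_lower:
--                     valid.append(valid_room)
--                     matched = True
--                     break
--             if not matched:
--                 invalid.append(room)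
--     return valid, invalid
-- ===== SOURCE B (Python) =====
-- VALID_ROOMS = frozenset(
--     {
--         "Living Room", "Kitchen", "Dining", "Entry", "Mudroom", "Garage",
--         "Deck", "Porch", "Powder Room", "Stairway", "Primary Bedroom",
--         "Primary Bath", "Primary Closet", "Primary Hall", "Office",
--         "Office Bath", "Bed 3", "Bath 3", "Loft", "Laundry", "Game Room",
--         "Bed 4", "Bath 4", "Gym", "Rack Room", "Patio",
--     }
-- )
--
-- _ROOM_BY_LOWER = {r.lower(): r for r in VALID_ROOMS}
--
-- def _validate_rooms(rooms: list[str]) -> tuple[list[str], list[str]]: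
--     valid = []
--     invalid = []
--     for room in rooms:
--         canon = _ROOM_BY_LOWER.get(room.lower())
--         if canon is not None:
--             valid.append(canon)
--         else:
--             invalid.append(room)
--     return valid, invalid
-- ===== Notes on version B (the rewrite author's own statement) =====
-- stated objective: simpler
-- what changed: Replaced the exact-match branch plus nested linear fuzzy scan with one precomputed lowercase-keyed dict and a single lookup per room; the inner loop and the two-stage check disappear.
import Mathlib
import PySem

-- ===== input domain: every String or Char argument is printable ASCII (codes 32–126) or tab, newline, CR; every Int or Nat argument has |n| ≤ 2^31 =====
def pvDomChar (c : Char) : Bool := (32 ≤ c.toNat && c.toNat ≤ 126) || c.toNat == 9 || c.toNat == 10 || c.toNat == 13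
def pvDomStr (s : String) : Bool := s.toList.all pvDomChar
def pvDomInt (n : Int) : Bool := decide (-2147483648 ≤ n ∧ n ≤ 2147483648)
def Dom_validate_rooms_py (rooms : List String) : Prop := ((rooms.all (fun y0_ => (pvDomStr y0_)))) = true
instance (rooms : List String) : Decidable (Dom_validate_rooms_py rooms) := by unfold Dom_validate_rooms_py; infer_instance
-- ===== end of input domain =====

-- B replaces the exact-match branch plus nested fuzzy scan with one lowercase-keyed dict lookup per room (simpler).

-- ===== PORT A =====
def pvValidRooms : List String :=
  ["Living Room", "Kitchen", "Dining", "Entry", "Mudroom", "Garage",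
   "Deck", "Porch", "Powder Room", "Stairway", "Primary Bedroom",
   "Primary Bath", "Primary Closet", "Primary Hall", "Office",
   "Office Bath", "Bed 3", "Bath 3", "Loft", "Laundry", "Game Room",
   "Bed 4", "Bath 4", "Gym", "Rack Room", "Patio"]

-- the inner 'for valid_room in VALID_ROOMS: … break' loop of A
def pvFuzzyScan (room_lower : String) : List String → Option String
  | [] => none
  | vr :: rest =>
      if PySem.Str.lower vr == room_lower then some vr else pvFuzzyScan room_lower rest

def validate_rooms_py (rooms : List String) : List String × List String :=
  rooms.foldl
    (fun (acc : List String × List String) room =>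
      if pvValidRooms.contains room then (acc.1 ++ [room], acc.2)
      else
        match pvFuzzyScan (PySem.Str.lower room) pvValidRooms with
        | some vr => (acc.1 ++ [vr], acc.2)
        | none => (acc.1, acc.2 ++ [room]))
    ([], [])

-- ===== PORT B =====
-- ROOM_BY_LOWER = {r.lower(): r for r in VALID_ROOMS}
def pvRoomByLower : PySem.Dict String String :=
  pvValidRooms.foldl (fun d r => d.insert (PySem.Str.lower r) r) PySem.Dict.empty

def validate_rooms_py_alt (rooms : List String) : List String × List String :=
  rooms.foldl
    (fun (acc : List String × List String) room =>
      match pvRoomByLower.get? (PySem.Str.lower room) with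
      | some canon => (acc.1 ++ [canon], acc.2)
      | none => (acc.1, acc.2 ++ [room]))
    ([], [])

-- ===== PRECONDITION & SPEC =====
def Spec_validate_rooms_py (rooms : List String) (out : List String × List String) : Prop := out = validate_rooms_py_alt rooms
instance (rooms : List String) (out : List String × List String) : Decidable (Spec_validate_rooms_py rooms out) := by unfold Spec_validate_rooms_py; infer_instance

-- ===== CLAIM (what is proved, stated in full; the proofs are below) =====
def Claim_equal_validate_rooms_py : Prop := ∀ (rooms : List String), Dom_validate_rooms_py rooms → Spec_validate_rooms_py rooms (validate_rooms_py rooms)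

-- ===== LEMMAS AND PROOFS =====

-- the dict built by B is the association list of (lower r, r) pairs, in order (keys are all fresh)
theorem pvRoomByLower_eq :
    pvRoomByLower = PySem.Dict.mk (pvValidRooms.map (fun r => (PySem.Str.lower r, r))) := by
  decide

-- lookup in that association list is exactly A's first-match scan
theorem get?_mk_map_eq_scan (L : List String) (k : String) :
    (PySem.Dict.mk (L.map (fun r => (PySem.Str.lower r, r)))).get? k = pvFuzzyScan k L := by
  induction L with
  | nil => rfl
  | cons r rest ih =>
      simp only [List.map_cons, PySem.Dict.get?_mk_cons, pvFuzzyScan]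
      rw [ih]

-- the lowercase forms of the valid rooms are pairwise distinct
theorem pvLowersNodup : (pvValidRooms.map PySem.Str.lower).Nodup := by decide

-- on a member of a lowercase-distinct list, the first fuzzy match is that member itself
theorem scan_of_mem (L : List String) (room : String)
    (hnd : (L.map PySem.Str.lower).Nodup) (hmem : room ∈ L) :
    pvFuzzyScan (PySem.Str.lower room) L = some room := by
  induction L with
  | nil => cases hmem
  | cons r rest ih =>
      simp only [List.map_cons, List.nodup_cons] at hnd
      simp only [pvFuzzyScan]
      by_cases h : PySem.Str.lower r = PySem.Str.lower room
      · rcases List.mem_cons.mp hmem with rfl | hm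
        · simp
        · exact absurd (h ▸ List.mem_map_of_mem hm) hnd.1
      · have hne : r ≠ room := fun e => h (by rw [e])
        have : room ∈ rest := by
          rcases List.mem_cons.mp hmem with rfl | hm
          · exact absurd rfl hne
          · exact hm
        simp only [beq_iff_eq, h, if_false]
        exact ih hnd.2 this

theorem step_eq (acc : List String × List String) (room : String) :
    (if pvValidRooms.contains room then (acc.1 ++ [room], acc.2)
     else
       match pvFuzzyScan (PySem.Str.lower room) pvValidRooms with
       | some vr => (acc.1 ++ [vr], acc.2)
       | none => (acc.1, acc.2 ++ [room]))
    =
    (match pvRoomByLower.get? (PySem.Str.lower room) with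
     | some canon => (acc.1 ++ [canon], acc.2)
     | none => (acc.1, acc.2 ++ [room])) := by
  rw [pvRoomByLower_eq, get?_mk_map_eq_scan]
  by_cases h : room ∈ pvValidRooms
  · rw [scan_of_mem pvValidRooms room pvLowersNodup h]
    simp [h]
  · simp [h]

-- ===== VERDICT (by name: the statement is the Claim_ definition above) =====
theorem validate_rooms_py_spec : Claim_equal_validate_rooms_py := by
  intro rooms _
  unfold Spec_validate_rooms_py validate_rooms_py validate_rooms_py_alt
  apply PySem.List.foldl_congr_mem
  intro acc room _
  exact step_eq acc room
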